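-- pv_equiv track=rewrite | github.com/marcodetering-prog/friendly-octo-parakeet | google_sheets_analyzer.py | _find_name_column
-- ===== SOURCE A (Python) =====
-- from typing import List, Dict, Set, Tuple, Optional
--
-- def _find_name_column(headers: List[str]) -> Optional[str]:
--     """Find the craftsman/company name column."""
--     # Prioritize these keywords in order
--     name_keywords = ["firmenname", "name", "handwerker", "craftsman", "betrieb", "company"]
--     for keyword in name_keywords:
--         for header in headers:
--             if header and keyword.lower() in header.lower():
--                 return header
--     # If no match, use first non-empty column
--     for header in headers:
--         if header and header.strip():
--             return header
--     return None
-- ===== SOURCE B (Python) =====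
-- from typing import List, Optional
--
-- def _find_name_column(headers: List[str]) -> Optional[str]:
--     """Find the craftsman/company name column (single pass, running best rank)."""
--     name_keywords = ["firmenname", "name", "handwerker", "craftsman", "betrieb", "company"]
--     best = None  # (rank, header); replaced only on strictly smaller rank
--     for header in headers:
--         if header:
--             hl = header.lower()
--             rank = None
--             for j, kw in enumerate(name_keywords):
--                 if kw in hl:
--                     rank = j
--                     break
--             if rank is not None and (best is None or rank < best[0]):
--                 best = (rank, header)
--     if best is not None:
--         return best[1]
--     for header in headers:
--         if header and header.strip():
--             return header
--     return None
-- ===== Notes on version B (the rewrite author's own statement) =====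
-- stated objective: alternative
-- what changed: Replaces A's keyword-outer nested scans (one full pass over headers per keyword) by a single pass over headers that computes each header's best keyword rank and keeps a running (rank, header) minimum with strict-less replacement.
import Mathlib
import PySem

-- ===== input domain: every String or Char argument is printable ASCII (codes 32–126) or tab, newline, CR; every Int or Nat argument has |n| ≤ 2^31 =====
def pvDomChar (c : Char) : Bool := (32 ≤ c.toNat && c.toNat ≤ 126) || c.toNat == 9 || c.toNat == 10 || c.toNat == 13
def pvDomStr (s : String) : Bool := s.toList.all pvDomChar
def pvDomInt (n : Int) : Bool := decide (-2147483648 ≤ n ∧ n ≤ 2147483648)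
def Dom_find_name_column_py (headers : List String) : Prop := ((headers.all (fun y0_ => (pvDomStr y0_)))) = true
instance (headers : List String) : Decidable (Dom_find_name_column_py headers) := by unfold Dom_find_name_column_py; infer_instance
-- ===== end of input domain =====

-- B replaces A's keyword-outer nested scans by ONE pass over headers keeping a running
-- (best keyword rank, header) minimum; same return value, objective: alternative.

def pvKeywords : List String := ["firmenname", "name", "handwerker", "craftsman", "betrieb", "company"]

-- ===== PORT A =====
-- inner loop: 'for header in headers: if header and keyword.lower() in header.lower(): return header'
def pvScanA (kw : String) : List String → Option String
  | [] => none
  | h :: t =>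
      if h ≠ "" ∧ PySem.Str.isIn (PySem.Str.lower kw) (PySem.Str.lower h) = true then some h
      else pvScanA kw t

-- outer loop over the keyword list
def pvLoopA (headers : List String) : List String → Option String
  | [] => none
  | kw :: rest =>
      match pvScanA kw headers with
      | some h => some h
      | none => pvLoopA headers rest

-- 'for header in headers: if header and header.strip(): return header'
def pvFallbackA : List String → Option String
  | [] => none
  | h :: t => if h ≠ "" ∧ PySem.Str.strip h ≠ "" then some h else pvFallbackA t

def find_name_column_py (headers : List String) : Option String :=
  match pvLoopA headers pvKeywords with
  | some h => some h
  | none => pvFallbackA headers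

-- ===== PORT B =====
-- 'for j, kw in enumerate(name_keywords): if kw in hl: rank = j; break'
def pvRankLoop (hl : String) (j : Nat) : List String → Option Nat
  | [] => none
  | kw :: rest => if PySem.Str.isIn kw hl = true then some j else pvRankLoop hl (j + 1) rest

-- single pass: running best (rank, header), replaced only on strictly smaller rank
def pvBestLoop (kws : List String) : Option (Nat × String) → List String → Option (Nat × String)
  | best, [] => best
  | best, h :: t =>
      let best' :=
        if h ≠ "" then
          match pvRankLoop (PySem.Str.lower h) 0 kws, best with
          | some r, none => some (r, h)
          | some r, some b => if r < b.1 then some (r, h) else best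
          | none, _ => best
        else best
      pvBestLoop kws best' t

def find_name_column_py_alt (headers : List String) : Option String :=
  match pvBestLoop pvKeywords none headers with
  | some b => some b.2
  | none => pvFallbackA headers  -- B's fallback loop is the identical code; shared helper

-- ===== PRECONDITION & SPEC =====
def Spec_find_name_column_py (headers : List String) (out : Option String) : Prop := out = find_name_column_py_alt headers
instance (headers : List String) (out : Option String) : Decidable (Spec_find_name_column_py headers out) := by unfold Spec_find_name_column_py; infer_instance

-- ===== CLAIM (what is proved, stated in full; the proofs are below) =====
def Claim_equal_find_name_column_py : Prop := ∀ (headers : List String), Dom_find_name_column_py headers → Spec_find_name_column_py headers (find_name_column_py headers)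

-- ===== LEMMAS AND PROOFS =====

-- shift of the best accumulator by one rank
def pvShift : Option (Nat × String) → Option (Nat × String) :=
  Option.map (fun p => (p.1 + 1, p.2))

theorem rankLoop_shift (hl : String) (j : Nat) (ks : List String) :
    pvRankLoop hl j ks = (pvRankLoop hl 0 ks).map (· + j) := by
  induction ks generalizing j with
  | nil => rfl
  | cons k ks ih =>
      simp only [pvRankLoop]
      split_ifs with hc
      · simp
      · rw [ih (j + 1), ih 1, Option.map_map]
        apply congrArg (fun f => Option.map f (pvRankLoop hl 0 ks))
        funext r; simp; omega

-- rank 0 in the accumulator is absorbing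
theorem bestLoop_zero (kws : List String) (h0 : String) (hs : List String) :
    pvBestLoop kws (some (0, h0)) hs = some (0, h0) := by
  induction hs with
  | nil => rfl
  | cons h t ih =>
      simp only [pvBestLoop]
      split_ifs with hne
      · cases hr : pvRankLoop (PySem.Str.lower h) 0 kws with
        | none => simpa using ih
        | some r => simpa using ih
      · exact ih

-- empty keyword list: the accumulator never changes
theorem bestLoop_nil (acc : Option (Nat × String)) (hs : List String) :
    pvBestLoop [] acc hs = acc := by
  induction hs generalizing acc with
  | nil => rfl
  | cons h t ih => simp only [pvBestLoop, pvRankLoop]; split_ifs <;> exact ih _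


-- the one-header step of B's loop, made explicit for the proofs
def pvStep (kws : List String) (best : Option (Nat × String)) (h : String) : Option (Nat × String) :=
  if h ≠ "" then
    match pvRankLoop (PySem.Str.lower h) 0 kws, best with
    | some r, none => some (r, h)
    | some r, some b => if r < b.1 then some (r, h) else best
    | none, _ => best
  else best

theorem rank_cons_pos (hl k : String) (ks : List String) (hc : PySem.Str.isIn k hl = true) :
    pvRankLoop hl 0 (k :: ks) = some 0 := by
  simp only [pvRankLoop]; rw [if_pos hc]

theorem rank_cons_neg (hl k : String) (ks : List String) (hc : PySem.Str.isIn k hl = false) :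
    pvRankLoop hl 0 (k :: ks) = (pvRankLoop hl 0 ks).map (· + 1) := by
  simp only [pvRankLoop]
  rw [if_neg (by rw [hc]; simp), rankLoop_shift hl 1 ks]

theorem step_zero (k : String) (ks : List String) (h : String) (hne : h ≠ "")
    (hc : PySem.Str.isIn k (PySem.Str.lower h) = true) (acc : Option (Nat × String)) :
    pvStep (k :: ks) (pvShift acc) h = some (0, h) := by
  unfold pvStep
  rw [if_pos hne, rank_cons_pos _ _ _ hc]
  cases acc with
  | none => rfl
  | some b => simp [pvShift]

theorem step_commute (k : String) (ks : List String) (h : String) (acc : Option (Nat × String))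
    (hna : ¬(h ≠ "" ∧ PySem.Str.isIn k (PySem.Str.lower h) = true)) :
    pvStep (k :: ks) (pvShift acc) h = pvShift (pvStep ks acc h) := by
  unfold pvStep
  by_cases hne : h ≠ ""
  · have hc : PySem.Str.isIn k (PySem.Str.lower h) = false := by
      cases hx : PySem.Str.isIn k (PySem.Str.lower h) with
      | false => rfl
      | true => exact absurd ⟨hne, hx⟩ hna
    rw [if_pos hne, if_pos hne, rank_cons_neg _ _ _ hc]
    cases hrk : pvRankLoop (PySem.Str.lower h) 0 ks with
    | none => cases acc <;> rfl
    | some r =>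
        cases acc with
        | none => rfl
        | some b =>
            simp only [pvShift, Option.map_some]
            by_cases hlt : r < b.1
            · rw [if_pos hlt, if_pos (by omega : r + 1 < b.1 + 1)]
              rfl
            · rw [if_neg hlt, if_neg (by omega : ¬ r + 1 < b.1 + 1)]
              simp
  · rw [if_neg hne, if_neg hne]

-- key loop-exchange lemma: peeling one keyword off the single-pass loop
theorem bestLoop_cons (k : String) (hk : PySem.Str.lower k = k) (ks : List String)
    (hs : List String) (acc : Option (Nat × String)) :
    pvBestLoop (k :: ks) (pvShift acc) hs =
      match pvScanA k hs with
      | some h => some (0, h)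
      | none => pvShift (pvBestLoop ks acc hs) := by
  induction hs generalizing acc with
  | nil => rfl
  | cons h t ih =>
      by_cases hm : h ≠ "" ∧ PySem.Str.isIn k (PySem.Str.lower h) = true
      · have hscan : pvScanA k (h :: t) = some h := by
          simp only [pvScanA, hk]; rw [if_pos hm]
        rw [hscan]
        show pvBestLoop (k :: ks) (pvStep (k :: ks) (pvShift acc) h) t = some (0, h)
        rw [step_zero k ks h hm.1 hm.2 acc]
        exact bestLoop_zero (k :: ks) h t
      · have hscan : pvScanA k (h :: t) = pvScanA k t := by
          simp only [pvScanA, hk]; rw [if_neg hm]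
        rw [hscan]
        show pvBestLoop (k :: ks) (pvStep (k :: ks) (pvShift acc) h) t = _
        rw [step_commute k ks h acc hm, ih (pvStep ks acc h)]
        rfl

-- the single pass computes the keyword-priority scan
theorem bestLoop_eq_loopA (kws : List String) (hkws : ∀ kw ∈ kws, PySem.Str.lower kw = kw)
    (hs : List String) :
    (pvBestLoop kws none hs).map (·.2) = pvLoopA hs kws := by
  induction kws with
  | nil => simp [bestLoop_nil, pvLoopA]
  | cons k ks ih =>
      have hk : PySem.Str.lower k = k := hkws k (by simp)
      have h0 : pvShift none = none := rfl
      have := bestLoop_cons k hk ks hs none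
      rw [h0] at this
      rw [this]
      cases hscan : pvScanA k hs with
      | some h => simp [pvLoopA, hscan]
      | none =>
          simp only [pvLoopA, hscan]
          rw [← ih (fun kw hm => hkws kw (by simp [hm]))]
          cases pvBestLoop ks none hs <;> simp [pvShift]

theorem pvKeywords_lower : ∀ kw ∈ pvKeywords, PySem.Str.lower kw = kw := by decide

-- ===== VERDICT (by name: the statement is the Claim_ definition above) =====
theorem find_name_column_py_spec : Claim_equal_find_name_column_py := by
  intro headers _
  unfold Spec_find_name_column_py find_name_column_py find_name_column_py_alt
  have h := bestLoop_eq_loopA pvKeywords pvKeywords_lower headers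
  cases hb : pvBestLoop pvKeywords none headers with
  | some b => rw [hb] at h; simp at h; rw [← h]
  | none => rw [hb] at h; simp at h; rw [← h]
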